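-- pv_equiv track=rewrite | github.com/jensl/critic | src/syntaxhighlight/clexer.py | rejoin
-- ===== SOURCE A (Python) =====
-- def rejoin(items, escape):
--     if escape:
--         fixed = []
--         for item in sorted(items, key=len, reverse=True):
--             for ch in "(){}[]*+?|.^$": item = item.replace(ch, "\\" + ch)
--             fixed.append(item)
--         items = fixed
--     return "|".join(items)
-- ===== SOURCE B (Python) =====
-- def rejoin(items, escape):
--     if not escape:
--         return "|".join(items)
--     buckets = {}
--     for item in items:
--         buckets.setdefault(len(item), []).append(item)
--     out = []
--     for length in sorted(buckets, reverse=True):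
--         for item in buckets[length]:
--             out.append("".join("\\" + ch if ch in "(){}[]*+?|.^$" else ch for ch in item))
--     return "|".join(out)
-- ===== Notes on version B (the rewrite author's own statement) =====
-- stated objective: alternative
-- what changed: Instead of comparison-sorting the whole item list and running 13 sequential .replace passes per item, B groups items into a dict of buckets keyed by length, sorts only the distinct lengths descending, emits each bucket in input order (stability for free), and escapes each item in one character-by-character pass.
import Mathlib
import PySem

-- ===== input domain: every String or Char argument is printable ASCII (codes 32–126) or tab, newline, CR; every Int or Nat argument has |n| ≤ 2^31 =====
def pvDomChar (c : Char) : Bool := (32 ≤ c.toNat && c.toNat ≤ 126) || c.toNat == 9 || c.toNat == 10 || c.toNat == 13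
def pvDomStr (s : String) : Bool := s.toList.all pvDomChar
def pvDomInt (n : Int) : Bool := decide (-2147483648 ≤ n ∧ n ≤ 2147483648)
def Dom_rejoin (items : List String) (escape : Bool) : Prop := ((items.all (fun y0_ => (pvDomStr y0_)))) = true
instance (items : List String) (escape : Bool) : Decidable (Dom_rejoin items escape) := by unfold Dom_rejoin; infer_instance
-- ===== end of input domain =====

-- B replaces A's sort-whole-list-then-13-replace-passes by a different algorithm:
-- group items into a dict of buckets keyed by length, sort only the DISTINCT
-- lengths descending, and escape each item in ONE character pass; objective: alternative.

-- ===== PORT A =====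
-- the metacharacter string A's inner loop iterates over
def pvMetas : List Char := "(){}[]*+?|.^$".toList

-- inner loop: for ch in "(){}[]*+?|.^$": item = item.replace(ch, "\\" + ch)
def rejoinEscapeA (item : String) : String :=
  pvMetas.foldl
    (fun it ch => PySem.Str.replace it (String.ofList [ch]) (String.ofList ['\\', ch])) item

def rejoin (items : List String) (escape : Bool) : String :=
  if escape then
    let fixed :=
      (PySem.List.sorted items (fun s => PySem.Str.len s) true).foldl
        (fun fixed item => fixed ++ [rejoinEscapeA item]) []
    PySem.Str.join "|" fixed
  else
    PySem.Str.join "|" items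

-- ===== PORT B =====
-- "\\" + ch if ch in "(){}[]*+?|.^$" else ch
def pvEscChar (ch : Char) : List Char :=
  if pvMetas.contains ch then ['\\', ch] else [ch]

-- "".join(… for ch in item): one character-by-character pass
def pvEscB (item : String) : String :=
  String.ofList (item.toList.flatMap pvEscChar)

-- buckets.setdefault(len(item), []).append(item) over all items
def pvBuckets (items : List String) : PySem.Dict Int (List String) :=
  items.foldl
    (fun d item => PySem.Dict.modify d (PySem.Str.len item) [] (fun v => v ++ [item]))
    PySem.Dict.empty

def rejoin_alt (items : List String) (escape : Bool) : String :=
  if escape = false then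
    PySem.Str.join "|" items
  else
    let buckets := pvBuckets items
    let out :=
      (PySem.List.sorted buckets.keys (fun k => k) true).foldl
        (fun out length =>
          (buckets.getD length []).foldl (fun out item => out ++ [pvEscB item]) out) []
    PySem.Str.join "|" out

-- ===== PRECONDITION & SPEC =====
def Spec_rejoin (items : List String) (escape : Bool) (out : String) : Prop := out = rejoin_alt items escape
instance (items : List String) (escape : Bool) (out : String) : Decidable (Spec_rejoin items escape out) := by unfold Spec_rejoin; infer_instance

-- ===== CLAIM (what is proved, stated in full; the proofs are below) =====
def Claim_equal_rejoin : Prop := ∀ (items : List String) (escape : Bool), Dom_rejoin items escape → Spec_rejoin items escape (rejoin items escape)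

-- ===== LEMMAS AND PROOFS =====

-- ---- per-item escaping: A's 13 replace passes = B's one character pass ----

-- s.replace(c, r) for a single-character pattern is a pointwise character map
theorem replace_go_single (c : Char) (r : List Char) :
    ∀ (fuel : Nat) (l acc : List Char), l.length ≤ fuel →
      PySem.Chars.replace.go [c] r fuel l acc
        = acc.reverse ++ l.flatMap (fun x => if x = c then r else [x]) := by
  intro fuel
  induction fuel with
  | zero =>
    intro l acc h
    have : l = [] := List.eq_nil_of_length_eq_zero (Nat.le_zero.mp h)
    subst this
    simp [PySem.Chars.replace.go]
  | succ n ih =>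
    intro l acc h
    cases l with
    | nil => simp [PySem.Chars.replace.go]
    | cons x t =>
      have ht : t.length ≤ n := by simpa using h
      by_cases hx : x = c
      · subst hx
        have hpre : List.isPrefixOf [x] (x :: t) = true := by
          simp [List.isPrefixOf]
        simp only [PySem.Chars.replace.go, hpre, if_pos]
        rw [ih _ _ (by simpa using ht)]
        simp
      · have hpre : List.isPrefixOf [c] (x :: t) = false := by
          simp [List.isPrefixOf]
          exact fun hc => (hx hc.symm).elim
        simp only [PySem.Chars.replace.go, hpre]
        rw [ih _ _ ht]
        simp [hx]

theorem replace_single (c : Char) (r l : List Char) :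
    PySem.Chars.replace l [c] r = l.flatMap (fun x => if x = c then r else [x]) := by
  unfold PySem.Chars.replace
  simp only [List.isEmpty_cons, Bool.false_eq_true, if_false]
  simpa using replace_go_single c r l.length l [] (le_refl _)

-- translation with respect to a set S of already-escaped metacharacters
def pvTrans (S : List Char) (l : List Char) : List Char :=
  l.flatMap (fun x => if S.contains x then ['\\', x] else [x])

theorem fold_replace_eq_trans :
    ∀ (rest pre l : List Char), (pre ++ rest).Nodup → '\\' ∉ pre ++ rest →
      rest.foldl (fun it ch => PySem.Chars.replace it [ch] ['\\', ch]) (pvTrans pre l)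
        = pvTrans (pre ++ rest) l := by
  intro rest
  induction rest with
  | nil => intro pre l _ _; simp
  | cons c rs ih =>
    intro pre l hnd hbs
    have hcpre : c ∉ pre := fun hc => (List.nodup_append.mp hnd).2.2 c hc c List.mem_cons_self rfl
    have hbc : '\\' ≠ c := by
      intro h; exact hbs (by rw [h]; exact List.mem_append_right _ List.mem_cons_self)
    have hstep : PySem.Chars.replace (pvTrans pre l) [c] ['\\', c] = pvTrans (pre ++ [c]) l := by
      rw [replace_single]
      unfold pvTrans
      rw [List.flatMap_assoc]
      refine List.flatMap_congr (fun x _ => ?_)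
      by_cases hxc : x = c
      · subst hxc
        simp [hcpre]
      · by_cases hxpre : x ∈ pre
        · simp [hxpre, hxc, hbc]
        · simp [hxpre, hxc]
    have hnd' : ((pre ++ [c]) ++ rs).Nodup := by simpa using hnd
    have hbs' : '\\' ∉ (pre ++ [c]) ++ rs := by simpa using hbs
    calc (c :: rs).foldl (fun it ch => PySem.Chars.replace it [ch] ['\\', ch]) (pvTrans pre l)
        = rs.foldl (fun it ch => PySem.Chars.replace it [ch] ['\\', ch]) (pvTrans (pre ++ [c]) l) := by
          rw [List.foldl_cons, hstep]
      _ = pvTrans ((pre ++ [c]) ++ rs) l := ih (pre ++ [c]) l hnd' hbs'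
      _ = pvTrans (pre ++ c :: rs) l := by simp

-- per item: A's replace chain equals B's one-pass escaping
theorem escA_eq_escB (item : String) : rejoinEscapeA item = pvEscB item := by
  have hfold : ∀ (ms : List Char) (l : List Char),
      ms.foldl (fun it ch => PySem.Str.replace it (String.ofList [ch]) (String.ofList ['\\', ch]))
        (String.ofList l)
        = String.ofList (ms.foldl (fun l ch => PySem.Chars.replace l [ch] ['\\', ch]) l) := by
    intro ms
    induction ms with
    | nil => intro l; rfl
    | cons m ms ih =>
      intro l
      simp only [List.foldl_cons]
      rw [show PySem.Str.replace (String.ofList l) (String.ofList [m]) (String.ofList ['\\', m])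
            = String.ofList (PySem.Chars.replace l [m] ['\\', m]) by
        unfold PySem.Str.replace; simp]
      exact ih _
  have h1 : rejoinEscapeA item
      = String.ofList (pvMetas.foldl (fun l ch => PySem.Chars.replace l [ch] ['\\', ch]) item.toList) := by
    unfold rejoinEscapeA
    rw [← hfold pvMetas item.toList, String.ofList_toList]
  rw [h1]
  have h2 := fold_replace_eq_trans pvMetas [] item.toList (by decide) (by decide)
  have h0 : pvTrans [] item.toList = item.toList := by simp [pvTrans]
  rw [h0] at h2
  rw [h2]
  unfold pvEscB pvTrans pvEscChar
  rfl

theorem escA_eq_escB_fun : rejoinEscapeA = pvEscB := funext escA_eq_escB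

-- ---- the bucket dict ----

-- each bucket holds exactly the items of that length, in input order
theorem bucket_getD (items : List String) (L : Int) :
    (pvBuckets items).getD L [] = items.filter (fun s => PySem.Str.len s == L) := by
  unfold pvBuckets
  rw [show (items.foldl
        (fun d item => PySem.Dict.modify d (PySem.Str.len item) [] (fun v => v ++ [item]))
        PySem.Dict.empty)
      = ((items.map (fun s => ((PySem.Str.len s : Int), s))).foldl
        (fun d p => PySem.Dict.modify d p.1 [] (fun v => v ++ [p.2]))
        PySem.Dict.empty) from
    (List.foldl_map (f := fun s => ((PySem.Str.len s : Int), s))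
      (g := fun (d : PySem.Dict Int (List String)) p => PySem.Dict.modify d p.1 [] (fun v => v ++ [p.2]))
      (l := items) (init := PySem.Dict.empty)).symm]
  rw [PySem.Dict.getD_foldl_modify_append]
  rw [List.filter_map]
  simp [Function.comp_def]

-- the dict's keys are the distinct lengths in first-occurrence order
theorem bucket_keys (items : List String) :
    (pvBuckets items).keys = PySem.Set.ofList (items.map (fun s => (PySem.Str.len s : Int))) := by
  unfold pvBuckets
  rw [PySem.Dict.keys_foldl_modify_key items (fun s => (PySem.Str.len s : Int)) []
        (fun _ item => (fun v => v ++ [item]))]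
  simp [PySem.Dict.keys_empty, PySem.Set.update, PySem.Set.ofList_eq_foldl]

-- ---- stability: a stable descending sort is characterised by its key-class filters ----

-- inserting x into a descending list appends it to its key class
theorem filter_insertBy {α : Type} (key : α → Int) (k : Int) (x : α) :
    ∀ (ys : List α), ys.Pairwise (fun a b => key b ≤ key a) →
      (PySem.List.insertBy (fun a b => decide (key b < key a)) x ys).filter (fun y => key y == k)
        = ys.filter (fun y => key y == k) ++ (if key x == k then [x] else []) := by
  intro ys
  induction ys with
  | nil => intro _; simp [PySem.List.insertBy, List.filter_cons]
  | cons y t ih =>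
    intro h
    have hy : ∀ z ∈ t, key z ≤ key y := (List.pairwise_cons.mp h).1
    by_cases hb : key y < key x
    · have : PySem.List.insertBy (fun a b => decide (key b < key a)) x (y :: t) = x :: y :: t := by
        simp [PySem.List.insertBy, hb]
      rw [this]
      by_cases hk : key x = k
      · have hnone : (y :: t).filter (fun z => key z == k) = [] := by
          rw [List.filter_eq_nil_iff]
          intro z hz
          have : key z ≤ key y := by
            rcases List.mem_cons.mp hz with rfl | hz
            · exact le_refl _
            · exact hy z hz
          simp only [beq_iff_eq]
          omega
        simp [hk, hnone]
      · simp [List.filter_cons, hk]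
    · have : PySem.List.insertBy (fun a b => decide (key b < key a)) x (y :: t)
          = y :: PySem.List.insertBy (fun a b => decide (key b < key a)) x t := by
        simp [PySem.List.insertBy, hb]
      rw [this]
      rw [List.filter_cons, List.filter_cons, ih (List.Pairwise.of_cons h)]
      split <;> simp

-- the insertion-sort fold preserves every key-class filter
theorem filter_foldl_insertBy {α : Type} (key : α → Int) (k : Int) :
    ∀ (xs acc : List α), acc.Pairwise (fun a b => key b ≤ key a) →
      ((xs.foldl (fun acc x => PySem.List.insertBy (fun a b => decide (key b < key a)) x acc) acc).filter
          (fun y => key y == k))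
        = acc.filter (fun y => key y == k) ++ xs.filter (fun y => key y == k) := by
  intro xs
  induction xs with
  | nil => intro acc _; simp
  | cons x t ih =>
    intro acc h
    rw [List.foldl_cons]
    rw [ih _ (PySem.List.insertBy_pairwise_ge key x acc h)]
    rw [filter_insertBy key k x acc h]
    rw [List.filter_cons]
    split <;> simp

-- sorted(xs, key, reverse=True) keeps each key class in input order (stability)
theorem sorted_rev_filter {α : Type} (key : α → Int) (xs : List α) (k : Int) :
    (PySem.List.sorted xs key true).filter (fun y => key y == k)
      = xs.filter (fun y => key y == k) := by
  rw [PySem.List.sorted_rev_eq_foldl_insertBy]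
  simpa using filter_foldl_insertBy key k xs [] (List.Pairwise.nil)

-- two descending lists with identical key-class filters are equal
theorem eq_of_desc_of_filters {α : Type} (key : α → Int) :
    ∀ (l₁ l₂ : List α), l₁.Pairwise (fun a b => key b ≤ key a) →
      l₂.Pairwise (fun a b => key b ≤ key a) →
      (∀ k, l₁.filter (fun x => key x == k) = l₂.filter (fun x => key x == k)) →
      l₁ = l₂ := by
  intro l₁
  induction l₁ with
  | nil =>
    intro l₂ _ _ hf
    cases l₂ with
    | nil => rfl
    | cons b t => have := hf (key b); simp at this
  | cons a l₁ ih =>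
    intro l₂ h₁ h₂ hf
    cases l₂ with
    | nil => have := hf (key a); simp at this
    | cons b t =>
      have hmax₂ : ∀ y ∈ b :: t, key y ≤ key b := by
        intro y hy
        rcases List.mem_cons.mp hy with rfl | hy
        · exact le_refl _
        · exact (List.pairwise_cons.mp h₂).1 y hy
      have hmax₁ : ∀ y ∈ a :: l₁, key y ≤ key a := by
        intro y hy
        rcases List.mem_cons.mp hy with rfl | hy
        · exact le_refl _
        · exact (List.pairwise_cons.mp h₁).1 y hy
      have hab : key a = key b := by
        have h1 := hf (key a)
        have ha : a ∈ (b :: t).filter (fun x => key x == key a) := by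
          rw [← h1]; simp
        have h2 := hf (key b)
        have hb : b ∈ (a :: l₁).filter (fun x => key x == key b) := by
          rw [h2]; simp
        have hle1 : key a ≤ key b := hmax₂ a (List.mem_filter.mp ha).1
        have hle2 : key b ≤ key a := hmax₁ b (List.mem_filter.mp hb).1
        omega
      have h1 := hf (key a)
      rw [List.filter_cons, List.filter_cons] at h1
      simp only [beq_self_eq_true, if_pos] at h1
      rw [show (key b == key a) = true from by simp [hab]] at h1
      simp only [if_pos] at h1
      have hhead : a = b := (List.cons.injEq _ _ _ _ ▸ h1).1
      have htail₀ : l₁.filter (fun x => key x == key a) = t.filter (fun x => key x == key a) := by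
        have := List.cons.injEq a (l₁.filter (fun x => key x == key a)) b
          (t.filter (fun x => key x == key a)) ▸ h1
        exact (List.cons_eq_cons.mp h1).2
      have htails : ∀ k, l₁.filter (fun x => key x == k) = t.filter (fun x => key x == k) := by
        intro k
        by_cases hk : k = key a
        · subst hk; exact htail₀
        · have := hf k
          rw [List.filter_cons, List.filter_cons] at this
          rw [show (key a == k) = false from by simp; omega,
              show (key b == k) = false from by simp; omega] at this
          simpa using this
      rw [hhead, ih t (List.Pairwise.of_cons h₁) (List.Pairwise.of_cons h₂) htails]

-- ---- the bucket concatenation is descending and has the right filters ----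

theorem flatMap_blocks_pairwise {α : Type} (key : α → Int) (xs : List α) :
    ∀ (K : List Int), K.Pairwise (fun a b => b < a) →
      (K.flatMap (fun L => xs.filter (fun s => key s == L))).Pairwise
        (fun a b => key b ≤ key a) := by
  intro K
  induction K with
  | nil => intro _; simp
  | cons L K' ih =>
    intro h
    rw [List.flatMap_cons, List.pairwise_append]
    refine ⟨?_, ih (List.Pairwise.of_cons h), ?_⟩
    · refine List.pairwise_of_forall_mem_list ?_
      intro a ha b hb
      have ha' := (List.mem_filter.mp ha).2
      have hb' := (List.mem_filter.mp hb).2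
      simp only [beq_iff_eq] at ha' hb'
      omega
    · intro a ha b hb
      have ha' := (List.mem_filter.mp ha).2
      rcases List.mem_flatMap.mp hb with ⟨L', hL', hb'⟩
      have hb'' := (List.mem_filter.mp hb').2
      have hLL : L' < L := (List.pairwise_cons.mp h).1 L' hL'
      simp only [beq_iff_eq] at ha' hb''
      omega

theorem filter_flatMap_not_mem {α : Type} (key : α → Int) (xs : List α) :
    ∀ (K : List Int) (k : Int), k ∉ K →
      (K.flatMap (fun L => xs.filter (fun s => key s == L))).filter (fun s => key s == k) = [] := by
  intro K
  induction K with
  | nil => intro k _; simp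
  | cons L K' ih =>
    intro k hk
    rw [List.flatMap_cons, List.filter_append, List.filter_filter]
    rw [ih k (fun h => hk (List.mem_cons_of_mem _ h))]
    rw [List.filter_eq_nil_iff.mpr ?_]
    · simp
    · intro s _
      simp only [Bool.and_eq_true, beq_iff_eq, not_and]
      intro h1 h2
      exact hk (by simp [← h1, ← h2])

theorem filter_flatMap_mem {α : Type} (key : α → Int) (xs : List α) :
    ∀ (K : List Int) (k : Int), K.Nodup → k ∈ K →
      (K.flatMap (fun L => xs.filter (fun s => key s == L))).filter (fun s => key s == k)
        = xs.filter (fun s => key s == k) := by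
  intro K
  induction K with
  | nil => intro k _ hk; simp at hk
  | cons L K' ih =>
    intro k hnd hk
    rw [List.flatMap_cons, List.filter_append, List.filter_filter]
    by_cases hkL : k = L
    · subst hkL
      rw [filter_flatMap_not_mem key xs K' k (List.nodup_cons.mp hnd).1]
      simp
    · rw [List.filter_eq_nil_iff.mpr ?_]
      · rw [List.nil_append]
        exact ih k (List.nodup_cons.mp hnd).2
          (by rcases List.mem_cons.mp hk with h | h; exact absurd h hkL; exact h)
      · intro s _
        simp only [Bool.and_eq_true, beq_iff_eq, not_and]
        intro h1 h2
        exact hkL (by omega)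

-- ---- the main sort theorem: stable descending sort = buckets by sorted distinct keys ----

theorem sorted_eq_flatMap {α : Type} (key : α → Int) (xs : List α) :
    PySem.List.sorted xs key true
      = (PySem.List.sorted (PySem.Set.ofList (xs.map key)) (fun k => k) true).flatMap
          (fun L => xs.filter (fun s => key s == L)) := by
  set K := PySem.List.sorted (PySem.Set.ofList (xs.map key)) (fun k => k) true with hKdef
  have hKnd : K.Nodup := by
    have hperm := PySem.List.sorted_perm (PySem.Set.ofList (xs.map key)) (fun k => k) true
    exact hperm.nodup_iff.mpr (PySem.Set.nodup_ofList (xs.map key))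
  have hKle : K.Pairwise (fun a b => b ≤ a) := by
    simpa using PySem.List.sorted_pairwise_rev (PySem.Set.ofList (xs.map key)) (fun k => k)
  have hKgt : K.Pairwise (fun a b => b < a) := by
    have := hKle.and hKnd
    exact this.imp (fun h => lt_of_le_of_ne h.1 (Ne.symm h.2))
  have hKmem : ∀ k, k ∈ K ↔ k ∈ xs.map key := by
    intro k
    rw [hKdef, PySem.List.mem_sorted, PySem.Set.mem_ofList]
  refine eq_of_desc_of_filters key _ _ (PySem.List.sorted_pairwise_rev xs key)
    (flatMap_blocks_pairwise key xs K hKgt) ?_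
  intro k
  rw [sorted_rev_filter key xs k]
  by_cases hk : k ∈ K
  · rw [filter_flatMap_mem key xs K k hKnd hk]
  · rw [filter_flatMap_not_mem key xs K k hk]
    rw [List.filter_eq_nil_iff.mpr ?_]
    intro s hs
    simp only [beq_iff_eq]
    intro h
    exact hk ((hKmem k).mpr (List.mem_map.mpr ⟨s, hs, h⟩))

-- ===== VERDICT (by name: the statement is the Claim_ definition above) =====
theorem rejoin_spec : Claim_equal_rejoin := by
  intro items escape _
  unfold Spec_rejoin rejoin rejoin_alt
  cases escape with
  | false => rfl
  | true =>
    simp only [Bool.true_eq_false, reduceIte]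
    rw [PySem.List.foldl_append_singleton_eq_map]
    simp only [bucket_getD, bucket_keys, PySem.List.foldl_append_singleton_eq_map]
    rw [PySem.List.foldl_append_eq_flatMap
      (g := fun L => (items.filter (fun s => PySem.Str.len s == L)).map pvEscB)]
    rw [← List.map_flatMap]
    rw [← sorted_eq_flatMap (key := fun s => PySem.Str.len s)]
    rw [escA_eq_escB_fun]
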